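-- pv_equiv track=rewrite | github.com/ThiagoDe/codesignal_core_python | confortable_cumbers.py | solution
-- ===== SOURCE A (Python) =====
-- def solution(l, r):
--     hash = {}
--     res = 0
--     pairs = {}
--     for n in range(l, r + 1):  # 11
--         digSum = sum(list(map(int, str(n))))
--         left = list(range(n - digSum, n))
--         right = list(range(n + 1, n + digSum + 1))
--         conf = left + right
--
--         hash[n] = conf
--
--     for k in range(l, r + 1):
--         for m in hash[k]:
--             if m in hash and k in hash[m]:
--                 res += 1
--
--     return res // 2
-- ===== SOURCE B (Python) =====
-- def solution(l, r):
--     res = 0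
--     for a in range(l, r + 1):
--         da = sum(map(int, str(a)))
--         top = min(a + da, r)
--         for b in range(a + 1, top + 1):
--             if sum(map(int, str(b))) >= b - a:
--                 res += 1
--     return res
-- ===== Notes on version B (the rewrite author's own statement) =====
-- stated objective: simpler
-- what changed: B removes A's dict of precomputed neighbour lists and the double-count-then-halve rescan: a single pass counts each unordered pair exactly once by scanning, for each a, only b in [a+1, min(a+digitsum(a), r)] and testing digitsum(b) >= b-a.
import Mathlib
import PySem

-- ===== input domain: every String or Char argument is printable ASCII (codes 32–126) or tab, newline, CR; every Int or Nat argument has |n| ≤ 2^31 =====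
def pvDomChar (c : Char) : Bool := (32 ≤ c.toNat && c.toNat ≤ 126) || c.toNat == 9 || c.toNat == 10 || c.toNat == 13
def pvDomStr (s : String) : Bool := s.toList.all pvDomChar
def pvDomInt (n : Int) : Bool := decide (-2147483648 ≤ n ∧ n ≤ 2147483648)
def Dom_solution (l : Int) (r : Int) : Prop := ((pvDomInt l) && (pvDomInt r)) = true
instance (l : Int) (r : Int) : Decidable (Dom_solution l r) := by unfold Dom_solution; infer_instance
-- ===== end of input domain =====

-- B drops A's dict of precomputed neighbour lists and the count-twice-then-halve rescan: one pass counting each unordered pair once.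

-- ===== PORT A =====
-- digSum = sum(list(map(int, str(n)))); int(c) is PySem.Int.ofChars? on the one-char string (the getD 0 default is unreachable under Pre_, where every char of str(n) is a digit)
def digitSum (n : Int) : Int :=
  ((PySem.Int.toChars n).map (fun c => (PySem.Int.ofChars? [c]).getD 0)).sum

-- conf = list(range(n - digSum, n)) + list(range(n + 1, n + digSum + 1))
def confA (n : Int) : List Int :=
  PySem.List.pyRange (n - digitSum n) n 1 ++ PySem.List.pyRange (n + 1) (n + digitSum n + 1) 1

-- the first loop: hash[n] = conf for n in range(l, r+1)
def hashA (l r : Int) : PySem.Dict Int (List Int) :=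
  (PySem.List.pyRange l (r + 1) 1).foldl (fun h n => h.insert n (confA n)) PySem.Dict.empty

def solution (l : Int) (r : Int) : Int :=
  let hash := hashA l r
  -- second loop; hash[k] is getD k [] (the key k is always present), 'm in hash and k in hash[m]' is && below
  let res : Int :=
    (PySem.List.pyRange l (r + 1) 1).foldl (fun res k =>
      (hash.getD k []).foldl (fun res m =>
        if hash.contains m && (hash.getD m []).contains k then res + 1 else res) res) 0
  PySem.Int.floordiv res 2

-- ===== PORT B =====
def solution_alt (l : Int) (r : Int) : Int :=
  (PySem.List.pyRange l (r + 1) 1).foldl (fun res a =>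
    let da := digitSum a
    let top := min (a + da) r
    (PySem.List.pyRange (a + 1) (top + 1) 1).foldl (fun res b =>
      if digitSum b ≥ b - a then res + 1 else res) res) 0

-- ===== PRECONDITION & SPEC =====
-- Pre_ excludes exactly the inputs whose range(l, r+1) contains a negative number: there str(n) contains '-', and int('-') raises ValueError in both A and B.
def Pre_solution (l : Int) (r : Int) : Prop := 0 ≤ l ∨ r < l
instance (l : Int) (r : Int) : Decidable (Pre_solution l r) := by unfold Pre_solution; infer_instance
def pvWitness_solution : Int × Int := (10, 20)

def Spec_solution (l : Int) (r : Int) (out : Int) : Prop := out = solution_alt l r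
instance (l : Int) (r : Int) (out : Int) : Decidable (Spec_solution l r out) := by unfold Spec_solution; infer_instance

-- ===== CLAIM (what is proved, stated in full; the proofs are below) =====
def Claim_equal_solution : Prop := ∀ (l : Int) (r : Int), Dom_solution l r → Pre_solution l r → Spec_solution l r (solution l r)

-- ===== LEMMAS AND PROOFS =====

-- n and m are "comfortable": both in range and each within the other's digit-sum distance
abbrev Comf (k m : Int) : Prop := m ≠ k ∧ |m - k| ≤ digitSum k ∧ |m - k| ≤ digitSum m

lemma mem_confA {m k : Int} : m ∈ confA k ↔ (m ≠ k ∧ |m - k| ≤ digitSum k) := by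
  simp [confA, PySem.List.mem_pyRange_one, abs_le]
  omega

lemma comf_symm {k m : Int} : Comf k m ↔ Comf m k := by
  unfold Comf
  constructor <;> (rintro ⟨h1, h2, h3⟩; rw [abs_sub_comm] at h2 h3; exact ⟨h1.symm, h3, h2⟩)

lemma nodup_confA (k : Int) : (confA k).Nodup := by
  refine List.Nodup.append (PySem.List.nodup_pyRange_one _ _) (PySem.List.nodup_pyRange_one _ _) ?_
  intro a ha hb
  rw [PySem.List.mem_pyRange_one] at ha hb
  omega

lemma toFinset_pyRange (a b : Int) : (PySem.List.pyRange a b 1).toFinset = Finset.Icc a (b - 1) := by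
  ext x
  simp only [List.mem_toFinset, PySem.List.mem_pyRange_one, Finset.mem_Icc]
  omega

lemma get?_foldl_insert (L : List Int) (h : PySem.Dict Int (List Int)) (m : Int) :
    (L.foldl (fun d n => d.insert n (confA n)) h).get? m
      = if m ∈ L then some (confA m) else h.get? m := by
  induction L generalizing h with
  | nil => simp
  | cons x xs ih =>
    simp only [List.foldl_cons, ih, List.mem_cons]
    by_cases hm : m ∈ xs
    · simp [hm]
    · by_cases hx : m = x
      · subst hx; simp [hm, PySem.Dict.get?_insert_self]
      · simp [hm, hx, PySem.Dict.get?_insert_of_ne _ _ hx]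

lemma hashA_get? (l r m : Int) :
    (hashA l r).get? m = if l ≤ m ∧ m ≤ r then some (confA m) else none := by
  rw [hashA, get?_foldl_insert]
  by_cases h : l ≤ m ∧ m ≤ r
  · simp [PySem.List.mem_pyRange_one, h]
  · have : ¬ (m ∈ PySem.List.pyRange l (r + 1) 1) := by
      rw [PySem.List.mem_pyRange_one]; omega
    simp [this, h, PySem.Dict.get?_empty]

lemma hashA_getD (l r m : Int) :
    (hashA l r).getD m [] = if l ≤ m ∧ m ≤ r then confA m else [] := by
  rw [PySem.Dict.getD_eq_get?_getD, hashA_get?]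
  split <;> rfl

lemma hashA_contains (l r m : Int) :
    (hashA l r).contains m = decide (l ≤ m ∧ m ≤ r) := by
  rw [PySem.Dict.contains_eq_isSome_get?, hashA_get?]
  by_cases h : l ≤ m ∧ m ≤ r <;> simp [h]

lemma cond_eq (l r k m : Int) :
    ((hashA l r).contains m && ((hashA l r).getD m []).contains k)
      = decide ((l ≤ m ∧ m ≤ r) ∧ k ∈ confA m) := by
  rw [hashA_contains, hashA_getD]
  by_cases h : l ≤ m ∧ m ≤ r
  · simp [h, List.contains_eq_mem]
  · simp [h]

-- countP over a Nodup list as a Finset card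
lemma countP_eq_card {L : List Int} (hL : L.Nodup) (p : Int → Bool) :
    L.countP p = (L.toFinset.filter (p ·)).card := by
  rw [← List.toFinset_filter, List.toFinset_card_of_nodup (hL.filter p), List.countP_eq_length_filter]

-- ===== A-side reduction: A's res counts every ordered comfortable pair over Icc l r =====
lemma A_eq (l r : Int) :
    solution l r = PySem.Int.floordiv
      ((∑ k ∈ Finset.Icc l r, ((Finset.Icc l r).filter (fun m => Comf k m)).card : ℕ) : Int) 2 := by
  have hfold : ∀ k ∈ PySem.List.pyRange l (r + 1) 1, ∀ res : Int,
      ((hashA l r).getD k []).foldl (fun res m =>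
        if (hashA l r).contains m && ((hashA l r).getD m []).contains k then res + 1 else res) res
      = res + ((((Finset.Icc l r).filter (fun m => Comf k m)).card : ℕ) : Int) := by
    intro k hk res
    rw [PySem.List.mem_pyRange_one] at hk
    have hdk : (hashA l r).getD k [] = confA k := by rw [hashA_getD]; simp [hk.1]; omega
    rw [hdk]
    have := PySem.List.foldl_if_add_one
      (fun m => (hashA l r).contains m && ((hashA l r).getD m []).contains k) (confA k) res
    rw [this]
    congr 2
    rw [countP_eq_card (nodup_confA k)]
    congr 1
    ext m
    simp only [Finset.mem_filter, List.mem_toFinset, cond_eq, decide_eq_true_eq, Finset.mem_Icc,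
      mem_confA, Comf]
    rw [abs_sub_comm k m]
    constructor
    · rintro ⟨⟨h1, h2⟩, ⟨h3, h4⟩, h5, h6⟩
      refine ⟨⟨h3, h4⟩, h1, h2, h6⟩
    · rintro ⟨⟨h3, h4⟩, h1, h2, h6⟩
      exact ⟨⟨h1, h2⟩, ⟨h3, h4⟩, fun h => h1 h.symm, h6⟩
  rw [solution]
  have hcongr := PySem.List.foldl_congr_mem
      (l := PySem.List.pyRange l (r + 1) 1)
      (init := (0 : Int))
      (f := fun res k => ((hashA l r).getD k []).foldl (fun res m =>
        if (hashA l r).contains m && ((hashA l r).getD m []).contains k then res + 1 else res) res)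
      (g := fun res k =>
        res + ((((Finset.Icc l r).filter (fun m => Comf k m)).card : ℕ) : Int))
      (by intro acc x hx; exact hfold x hx acc)
  rw [hcongr]
  rw [PySem.List.foldl_add]
  rw [← List.sum_toFinset _ (PySem.List.nodup_pyRange_one _ _), toFinset_pyRange]
  simp only [add_sub_cancel_right, zero_add, Nat.cast_sum]

-- ===== B-side reduction: B counts every comfortable pair with a < b once =====
lemma B_eq (l r : Int) :
    solution_alt l r
      = ((∑ a ∈ Finset.Icc l r, ((Finset.Icc l r).filter (fun b => a < b ∧ Comf a b)).card : ℕ) : Int) := by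
  have hfold : ∀ a ∈ PySem.List.pyRange l (r + 1) 1, ∀ res : Int,
      (PySem.List.pyRange (a + 1) (min (a + digitSum a) r + 1) 1).foldl (fun res b =>
        if digitSum b ≥ b - a then res + 1 else res) res
      = res + ((((Finset.Icc l r).filter (fun b => a < b ∧ Comf a b)).card : ℕ) : Int) := by
    intro a ha res
    rw [PySem.List.mem_pyRange_one] at ha
    rw [PySem.List.foldl_ite_add_one]
    congr 2
    rw [countP_eq_card (PySem.List.nodup_pyRange_one _ _), toFinset_pyRange]
    congr 1
    ext b
    simp only [Finset.mem_filter, Finset.mem_Icc, decide_eq_true_eq, Comf, abs_le,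
      add_sub_cancel_right, le_min_iff, ge_iff_le]
    constructor
    · rintro ⟨⟨h1, h2, h3⟩, h4⟩
      refine ⟨⟨by omega, by omega⟩, by omega, by omega, by omega, by omega⟩
    · rintro ⟨⟨h1, h2⟩, h3, h4, h5, h6⟩
      refine ⟨⟨by omega, by omega, by omega⟩, by omega⟩
  simp only [solution_alt]
  have hcongr := PySem.List.foldl_congr_mem
      (l := PySem.List.pyRange l (r + 1) 1)
      (init := (0 : Int))
      (f := fun res a => (PySem.List.pyRange (a + 1) (min (a + digitSum a) r + 1) 1).foldl (fun res b =>
        if digitSum b ≥ b - a then res + 1 else res) res)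
      (g := fun res a =>
        res + ((((Finset.Icc l r).filter (fun b => a < b ∧ Comf a b)).card : ℕ) : Int))
      (by intro acc x hx; exact hfold x hx acc)
  rw [hcongr, PySem.List.foldl_add]
  rw [← List.sum_toFinset _ (PySem.List.nodup_pyRange_one _ _), toFinset_pyRange]
  simp only [add_sub_cancel_right, zero_add, Nat.cast_sum]

-- ===== symmetry: the ordered count is twice the a < b count =====
lemma split_card (s : Finset Int) (k : Int) :
    (s.filter (fun m => Comf k m)).card
      = (s.filter (fun m => k < m ∧ Comf k m)).card + (s.filter (fun m => m < k ∧ Comf k m)).card := by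
  rw [← Finset.card_union_of_disjoint]
  · congr 1
    ext m
    simp only [Finset.mem_union, Finset.mem_filter]
    constructor
    · rintro ⟨hm, hc⟩
      rcases lt_trichotomy k m with h | h | h
      · exact Or.inl ⟨hm, h, hc⟩
      · exact absurd h.symm (hc.1)
      · exact Or.inr ⟨hm, h, hc⟩
    · rintro (⟨hm, _, hc⟩ | ⟨hm, _, hc⟩) <;> exact ⟨hm, hc⟩
  · rw [Finset.disjoint_left]
    intro m hm hm'
    simp only [Finset.mem_filter] at hm hm'
    obtain ⟨_, h1, _⟩ := hm
    obtain ⟨_, h2, _⟩ := hm'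
    omega

lemma double_count (s : Finset Int) :
    ∑ k ∈ s, (s.filter (fun m => Comf k m)).card
      = 2 * ∑ k ∈ s, (s.filter (fun m => k < m ∧ Comf k m)).card := by
  have hswap : ∑ k ∈ s, (s.filter (fun m => m < k ∧ Comf k m)).card
      = ∑ k ∈ s, (s.filter (fun m => k < m ∧ Comf k m)).card := by
    simp only [Finset.card_filter]
    rw [Finset.sum_comm]
    apply Finset.sum_congr rfl
    intro k _
    apply Finset.sum_congr rfl
    intro m _
    by_cases h : k < m ∧ Comf k m
    · rw [if_pos ⟨h.1, comf_symm.mp h.2⟩, if_pos h]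
    · rw [if_neg, if_neg h]
      intro ⟨h1, h2⟩
      exact h ⟨h1, comf_symm.mp h2⟩
  calc ∑ k ∈ s, (s.filter (fun m => Comf k m)).card
      = ∑ k ∈ s, ((s.filter (fun m => k < m ∧ Comf k m)).card
          + (s.filter (fun m => m < k ∧ Comf k m)).card) := by
        exact Finset.sum_congr rfl (fun k _ => split_card s k)
    _ = _ := by rw [Finset.sum_add_distrib, hswap]; ring

theorem main_eq (l r : Int) : solution l r = solution_alt l r := by
  rw [A_eq, B_eq, double_count]
  rw [PySem.Int.floordiv_eq_ediv_of_pos (by norm_num)]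
  push_cast
  omega

-- ===== VERDICT (by name: the statement is the Claim_ definition above) =====
theorem solution_spec : Claim_equal_solution := by
  intro l r _ _
  exact main_eq l r
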